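-- pv_equiv track=rewrite | github.com/TeckZin/Poker_Stats_Google_Sheets | main.py | get_player_in_date_game
-- ===== SOURCE A (Python) =====
-- def get_player_in_date_game(date_list, player_list):
--     game = {}
--     take_date_data_flag = False
--     for i in range(len(date_list)):
--         date = date_list[i]
--         if take_date_data_flag:
--             if date not in game:
--                 game[date] = [player_list[i]]
--             else:
--                 game[date].append(player_list[i])
--         elif date == "Date":
--             take_date_data_flag = True
--
--
--     return game
-- ===== SOURCE B (Python) =====
-- def get_player_in_date_game(date_list, player_list):
--     try:
--         start = date_list.index("Date") + 1
--     except ValueError: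
--         return {}
--     tail = date_list[start:]
--     return {d: [player_list[j] for j, e in enumerate(tail, start) if e == d]
--             for d in dict.fromkeys(tail)}
-- ===== Notes on version B (the rewrite author's own statement) =====
-- stated objective: alternative
-- what changed: Replaces A's single flag-driven pass that incrementally appends into a dict of lists by a keys-then-gather algorithm: compute the ordered distinct dates after the marker with dict.fromkeys, then build each group with a separate per-key scan of the tail (a dict comprehension of list comprehensions); no incremental accumulator dict exists in B.
import Mathlib
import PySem

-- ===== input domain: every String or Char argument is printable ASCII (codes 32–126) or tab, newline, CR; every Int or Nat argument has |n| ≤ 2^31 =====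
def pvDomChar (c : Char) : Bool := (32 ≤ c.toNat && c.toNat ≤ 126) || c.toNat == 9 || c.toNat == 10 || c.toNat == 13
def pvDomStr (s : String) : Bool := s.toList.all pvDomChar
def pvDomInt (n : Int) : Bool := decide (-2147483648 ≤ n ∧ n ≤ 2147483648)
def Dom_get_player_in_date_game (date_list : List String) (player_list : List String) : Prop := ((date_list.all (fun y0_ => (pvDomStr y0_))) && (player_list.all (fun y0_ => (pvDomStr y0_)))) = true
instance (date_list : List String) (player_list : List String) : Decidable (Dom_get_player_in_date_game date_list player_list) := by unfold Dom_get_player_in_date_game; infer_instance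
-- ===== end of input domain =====

-- B replaces A's single flag-driven accumulating pass by a keys-then-gather algorithm
-- (ordered distinct dates first, then one scan of the tail per key); objective: alternative.

-- ===== PORT A =====
-- the loop body; pyGetD is exact under Pre_ (every accessed index is in range there)
def pvStepA (date_list player_list : List String)
    (st : PySem.Dict String (List String) × Bool) (i : Int) :
    PySem.Dict String (List String) × Bool :=
  let date := PySem.List.pyGetD date_list i ""
  if st.2 = true then
    (if st.1.contains date = false then
        st.1.insert date [PySem.List.pyGetD player_list i ""]
      else
        -- game[date].append(p): in-place update keeping position = modify
        st.1.modify date [] (fun l => l ++ [PySem.List.pyGetD player_list i ""]), st.2)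
  else if date = "Date" then (st.1, true) else st

def get_player_in_date_game (date_list : List String) (player_list : List String) : List (String × List String) :=
  (((PySem.List.pyRange 0 (PySem.List.len date_list) 1).foldl
      (pvStepA date_list player_list) (PySem.Dict.empty, false)).1).items

-- ===== PORT B =====
def get_player_in_date_game_alt (date_list : List String) (player_list : List String) : List (String × List String) :=
  match PySem.List.index? date_list "Date" with
  | none => []
  | some k =>
      let start : Int := (k : Int) + 1
      let tail := PySem.List.slice date_list (some start) none
      -- {d: [player_list[j] for j, e in enumerate(tail, start) if e == d] for d in dict.fromkeys(tail)}
      (PySem.List.dedup tail).map (fun d =>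
        (d, ((PySem.List.enumerate tail start).filter (fun je => je.2 == d)).map
              (fun je => PySem.List.pyGetD player_list je.1 "")))

-- ===== PRECONDITION & SPEC =====
-- Pre_ excludes exactly the inputs on which A raises IndexError: a "Date" marker strictly before
-- the last position with player_list shorter than date_list (B raises there too).
def Pre_get_player_in_date_game (date_list : List String) (player_list : List String) : Prop :=
  date_list.length ≤ player_list.length ∨ "Date" ∉ date_list.dropLast
instance (date_list : List String) (player_list : List String) : Decidable (Pre_get_player_in_date_game date_list player_list) := by unfold Pre_get_player_in_date_game; infer_instance

def pvWitness_get_player_in_date_game : List String × List String :=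
  (["x", "Date", "d1", "d2", "d1"], ["p0", "p1", "alice", "bob", "carol"])

def Spec_get_player_in_date_game (date_list : List String) (player_list : List String) (out : List (String × List String)) : Prop := out = get_player_in_date_game_alt date_list player_list
instance (date_list : List String) (player_list : List String) (out : List (String × List String)) : Decidable (Spec_get_player_in_date_game date_list player_list out) := by unfold Spec_get_player_in_date_game; infer_instance

-- ===== CLAIM (what is proved, stated in full; the proofs are below) =====
def Claim_equal_get_player_in_date_game : Prop := ∀ (date_list : List String) (player_list : List String), Dom_get_player_in_date_game date_list player_list → Pre_get_player_in_date_game date_list player_list → Spec_get_player_in_date_game date_list player_list (get_player_in_date_game date_list player_list)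

-- ===== LEMMAS AND PROOFS =====

-- Phase 1 (flag down): while no "Date" is seen the state is untouched.
theorem pvPhase1 (dl pl : List String) (m a : Nat) (st : PySem.Dict String (List String) × Bool)
    (hst : st.2 = false)
    (h : ∀ j ∈ List.range' a m, dl[j]?.getD "" ≠ "Date") :
    (List.range' a m).foldl (fun s (j : Nat) => pvStepA dl pl s (j : Int)) st = st := by
  induction m generalizing a with
  | zero => rfl
  | succ m ih =>
      rw [List.range'_succ, List.foldl_cons]
      have hj : dl[a]?.getD "" ≠ "Date" := h a (by simp [List.mem_range'_1])
      have hstep : pvStepA dl pl st (a : Int) = st := by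
        simp only [pvStepA, hst]
        simp [PySem.List.pyGetD_natCast, List.getD_eq_getElem?_getD, hj]
      rw [hstep]
      exact ih (a + 1) (fun j hj' => h j (by simp [List.mem_range'_1] at hj' ⊢; omega))

-- A's group-building step once the flag is up, as a fold over pairs.
def pvStepP (g : PySem.Dict String (List String)) (dp : String × String) :
    PySem.Dict String (List String) :=
  g.modify dp.1 [] (fun l => l ++ [dp.2])

-- Phase 2 (flag up): the indexed tail loop is the pair fold over the zipped suffixes.
theorem pvPhase2 (dl pl : List String) (m a : Nat) (d : PySem.Dict String (List String))
    (hlen : a + m = dl.length) (hpl : dl.length ≤ pl.length) :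
    (List.range' a m).foldl (fun s (j : Nat) => pvStepA dl pl s (j : Int)) (d, true)
      = (((dl.drop a).zip (pl.drop a)).foldl pvStepP d, true) := by
  induction m generalizing a d with
  | zero =>
      have h : dl.drop a = [] := by apply List.drop_eq_nil_of_le; omega
      simp [h]
  | succ m ih =>
      have ha : a < dl.length := by omega
      have ha' : a < pl.length := by omega
      rw [List.range'_succ, List.foldl_cons]
      have hdl : dl.drop a = dl[a] :: dl.drop (a + 1) := (List.getElem_cons_drop ha).symm
      have hpl' : pl.drop a = pl[a] :: pl.drop (a + 1) := (List.getElem_cons_drop ha').symm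
      have hstep : pvStepA dl pl (d, true) (a : Int)
          = (pvStepP d (dl[a], pl[a]), true) := by
        simp only [pvStepA, pvStepP]
        simp only [PySem.List.pyGetD_natCast, List.getD_eq_getElem?_getD,
          List.getElem?_eq_getElem ha, List.getElem?_eq_getElem ha', Option.getD_some]
        by_cases hc : d.contains dl[a] = false
        · simp [hc, PySem.Dict.modify, PySem.Dict.getD_of_not_contains]
        · simp [hc, PySem.Dict.modify]
      rw [hstep, ih (a + 1) _ (by omega), hdl, hpl', List.zip_cons_cons, List.foldl_cons]

-- A dict with unique keys is its keys paired with their getD-values.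
theorem pvItemsEq (d : PySem.Dict String (List String)) (hnd : d.keys.Nodup) :
    d.items = d.keys.map (fun k => (k, d.getD k [])) := by
  have h : ∀ (l : List (String × List String)), (∀ p ∈ l, (p.1, d.getD p.1 []) = p) →
      l.map (fun p => (p.1, d.getD p.1 [])) = l := by
    intro l
    induction l with
    | nil => intro _; rfl
    | cons a t ih => intro hl; simp [hl a (by simp), ih (fun p hp => hl p (by simp [hp]))]
  have h := h d.items (by
    intro p hp
    have := PySem.Dict.getD_of_mem_items (d := d) (k := p.1) (v := p.2) (by simpa using hp) hnd (d0 := [])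
    simp [this])
  calc d.items = d.items.map (fun p => (p.1, d.getD p.1 [])) := h.symm
    _ = (d.items.map (·.1)).map (fun k => (k, d.getD k [])) := by rw [List.map_map]; rfl
    _ = d.keys.map (fun k => (k, d.getD k [])) := rfl

-- Per-key gather: B's enumerate/index comprehension equals the pair-fold's group for each key.
theorem pvGather (pl : List String) (k : String) :
    ∀ (tl : List String) (n : Nat), n + tl.length ≤ pl.length →
    ((PySem.List.enumerate tl (n : Int)).filter (fun je => je.2 == k)).map
        (fun je => PySem.List.pyGetD pl je.1 "")
      = (((tl.zip (pl.drop n)).filter (fun p => p.1 == k)).map (·.2)) := by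
  intro tl
  induction tl with
  | nil => intro n _; simp [PySem.List.enumerate_nil]
  | cons x tl' ih =>
      intro n hn
      have hn' : n < pl.length := by simp at hn; omega
      have hpl : pl.drop n = pl[n] :: pl.drop (n + 1) := (List.getElem_cons_drop hn').symm
      have hget : PySem.List.pyGetD pl (n : Int) "" = pl[n] := by
        simp [PySem.List.pyGetD_natCast, List.getD_eq_getElem?_getD, List.getElem?_eq_getElem hn']
      have hcast : ((n : Int) + 1) = ((n + 1 : Nat) : Int) := by push_cast; ring
      have ihn : ((PySem.List.enumerate tl' ((n + 1 : Nat) : Int)).filter (fun je => je.2 == k)).map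
            (fun je => PySem.List.pyGetD pl je.1 "")
          = (((tl'.zip (pl.drop (n + 1))).filter (fun p => p.1 == k)).map (·.2)) :=
        ih (n + 1) (by simp at hn ⊢; omega)
      rw [PySem.List.enumerate_cons, hpl, List.zip_cons_cons, hcast]
      by_cases hx : x = k
      · have hb : (x == k) = true := by simp [hx]
        simp only [List.filter_cons, hb, if_true, List.map_cons]
        rw [ihn, hget]
      · have hb : (x == k) = false := by simp [hx]
        simp only [List.filter_cons, hb]
        exact ihn

theorem get_player_in_date_game_eq (dl pl : List String)
    (hpre : Pre_get_player_in_date_game dl pl) :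
    get_player_in_date_game dl pl = get_player_in_date_game_alt dl pl := by
  unfold get_player_in_date_game get_player_in_date_game_alt
  rw [PySem.List.len_eq]
  have hrange : PySem.List.pyRange 0 (dl.length : Int) 1
      = (List.range' 0 dl.length).map (fun k : Nat => (k : Int)) := by
    rw [PySem.List.pyRange_one]
    simp [List.range_eq_range']
  rw [hrange, List.foldl_map]
  cases hidx : PySem.List.index? dl "Date" with
  | none =>
      have hmem : "Date" ∉ dl := (PySem.List.index?_eq_none_iff dl "Date").mp hidx
      rw [pvPhase1 dl pl dl.length 0 _ rfl]
      · rfl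
      · intro j hj
        simp [List.mem_range'_1] at hj
        rw [List.getElem?_eq_getElem hj, Option.getD_some]
        intro hEq
        exact hmem (by rw [← hEq]; exact List.getElem_mem _)
  | some k =>
      obtain ⟨hk, hkd, hprev⟩ := PySem.List.getElem_of_index?_eq_some hidx
      -- split the range at the marker
      have hsplit : List.range' 0 dl.length
          = List.range' 0 k ++ [k] ++ List.range' (k + 1) (dl.length - (k + 1)) := by
        have e1 : dl.length = (k + 1) + (dl.length - (k + 1)) := by omega
        conv_lhs => rw [e1]
        rw [← List.range'_append, List.range'_1_concat]
        norm_num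
      rw [hsplit, List.foldl_append, List.foldl_append]
      rw [pvPhase1 dl pl k 0 _ rfl]
      · -- the marker step flips the flag
        have hflip : pvStepA dl pl (PySem.Dict.empty, false) (k : Int)
            = (PySem.Dict.empty, true) := by
          simp only [pvStepA]
          simp [PySem.List.pyGetD_natCast, List.getD_eq_getElem?_getD,
            List.getElem?_eq_getElem hk, hkd]
        rw [List.foldl_cons, List.foldl_nil, hflip]
        -- the tail slice is a drop
        have hs1 : PySem.List.slice dl (some ((k : Int) + 1)) none = dl.drop (k + 1) := by
          have h : ((k : Int) + 1) = ((k + 1 : Nat) : Int) := by push_cast; ring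
          rw [h, PySem.List.slice_from_natCast]
        rcases hpre with hlong | hnd
        · -- the long case: reduce A's loop to the pair fold, then match B's keys-then-gather shape
          rw [pvPhase2 dl pl (dl.length - (k + 1)) (k + 1) _ (by omega) hlong]
          set L := (dl.drop (k + 1)).zip (pl.drop (k + 1)) with hL
          have hndk : ((L.foldl pvStepP PySem.Dict.empty)).keys.Nodup := by
            have := PySem.Dict.nodup_keys_foldl_modify_key L (fun p : String × String => p.1)
              ([] : List String) (fun _ p l => l ++ [p.2]) PySem.Dict.empty (by simp)
            simpa [pvStepP] using this
          rw [pvItemsEq _ hndk]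
          have hkeys : (L.foldl pvStepP PySem.Dict.empty).keys
              = PySem.Set.ofList (L.map (·.1)) := by
            have := PySem.Dict.keys_foldl_modify_key L (fun p : String × String => p.1)
              ([] : List String) (fun _ p l => l ++ [p.2]) PySem.Dict.empty
            simpa [pvStepP, PySem.Set.update, PySem.Set.ofList_eq_foldl] using this
          have hfst : L.map (·.1) = dl.drop (k + 1) := by
            apply List.map_fst_zip
            simp; omega
          have hgetD : ∀ key, (L.foldl pvStepP PySem.Dict.empty).getD key []
              = ((L.filter (fun p => p.1 == key)).map (·.2)) := by
            intro key
            have := PySem.Dict.getD_foldl_modify_append (l := L) (d := PySem.Dict.empty) (c := key)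
            simpa [pvStepP] using this
          rw [hkeys, hfst]
          dsimp only
          rw [hs1]
          simp only [PySem.List.dedup_eq_ofList]
          apply List.map_congr_left
          intro key _
          have hc2 : ((k : Int) + 1) = ((k + 1 : Nat) : Int) := by push_cast; ring
          rw [hgetD key, hL, hc2,
            pvGather pl key (dl.drop (k + 1)) (k + 1) (by simp; omega)]
        · -- marker only at the last position: the tail is empty on both sides
          have hklast : k + 1 = dl.length := by
            by_contra hne
            have hklt : k < dl.length - 1 := by omega
            apply hnd
            have : dl.dropLast[k]'(by simp [List.length_dropLast]; omega) = dl[k] :=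
              List.getElem_dropLast ..
            rw [← hkd, ← this]
            exact List.getElem_mem _
          have hm0 : dl.length - (k + 1) = 0 := by omega
          have hd0 : dl.drop (k + 1) = [] := by apply List.drop_eq_nil_of_le; omega
          have he : (PySem.Dict.empty : PySem.Dict String (List String)).items = [] := rfl
          dsimp only
          rw [hs1]
          simp [hm0, hd0, he, PySem.List.dedup_eq_ofList, PySem.Set.ofList]
      · intro j hj
        simp [List.mem_range'_1] at hj
        rw [List.getElem?_eq_getElem (by omega : j < dl.length), Option.getD_some]
        exact hprev j hj

-- ===== VERDICT (by name: the statement is the Claim_ definition above) =====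
theorem get_player_in_date_game_spec : Claim_equal_get_player_in_date_game := by
  intro dl pl _ hpre
  unfold Spec_get_player_in_date_game
  exact get_player_in_date_game_eq dl pl hpre
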